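-- pv_equiv track=rewrite | github.com/TallChris91/CACAPO-Dataset | Statistics/Statistics_Corpus.py | ProdigySlotsPerMR
-- ===== SOURCE A (Python) =====
-- def ProdigySlotsPerMR(domaindata):
--     mrlist = []
--     filterlist = ['text', 'textidx', 'paragraphidx', 'lineidx']
--
--     for text in domaindata:
--         for paragraph in text:
--             for sentencedict in paragraph:
--                 newsentencedict = {k: v for k, v in sentencedict.items() if k not in filterlist}
--                 mrlist.append(newsentencedict)
--
--     totalslots = 0
--     for mr in mrlist:
--         totalslots += len(mr)
--
--     return totalslots, len(mrlist)
-- ===== SOURCE B (Python) =====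
-- def ProdigySlotsPerMR(domaindata):
--     filterlist = ['text', 'textidx', 'paragraphidx', 'lineidx']
--     mrs = [sd for text in domaindata for paragraph in text for sd in paragraph]
--     allkeys = sum(len(sd) for sd in mrs)
--     filtered = sum(1 for sd in mrs for f in filterlist if f in sd)
--     return allkeys - filtered, len(mrs)
-- ===== Notes on version B (the rewrite author's own statement) =====
-- stated objective: alternative
-- what changed: B flattens the nesting into one list of sentence dicts, then counts by complement: total keys minus occurrences of the four filter keys (iterating over filterlist with membership tests, never filtering or scanning the dict keys against filterlist), instead of A's building a filtered dict per sentence and summing their lengths in a second pass.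
import Mathlib
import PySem

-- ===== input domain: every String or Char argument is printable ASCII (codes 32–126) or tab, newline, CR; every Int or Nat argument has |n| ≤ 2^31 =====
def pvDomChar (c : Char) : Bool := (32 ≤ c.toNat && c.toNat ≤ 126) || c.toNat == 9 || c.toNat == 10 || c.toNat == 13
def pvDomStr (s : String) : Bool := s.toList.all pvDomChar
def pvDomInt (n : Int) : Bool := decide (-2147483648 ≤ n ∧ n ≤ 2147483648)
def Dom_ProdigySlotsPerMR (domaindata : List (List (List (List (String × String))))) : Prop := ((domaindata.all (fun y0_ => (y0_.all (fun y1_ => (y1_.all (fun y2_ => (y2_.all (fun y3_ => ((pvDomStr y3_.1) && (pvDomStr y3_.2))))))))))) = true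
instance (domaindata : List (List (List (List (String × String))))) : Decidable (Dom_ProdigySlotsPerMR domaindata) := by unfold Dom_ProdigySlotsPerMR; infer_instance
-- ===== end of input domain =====

-- B replaces A's "build a filtered dict per sentence, then sum their lengths" with
-- flatten-then-complement-count: total key count minus membership hits of the four
-- filter keys (alternative decomposition; no intermediate dicts are built).


-- ===== PORT A =====
-- the dict comprehension {k: v for k, v in sentencedict.items() if k not in filterlist}
def pvFilterDict (filterlist : List String) (sd : List (String × String)) : PySem.Dict String String :=
  sd.foldl (fun d kv => if filterlist.contains kv.1 then d else d.insert kv.1 kv.2) PySem.Dict.empty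

def ProdigySlotsPerMR (domaindata : List (List (List (List (String × String))))) : Int × Int :=
  let filterlist := ["text", "textidx", "paragraphidx", "lineidx"]
  let mrlist : List (PySem.Dict String String) :=
    domaindata.foldl (fun acc text =>
      text.foldl (fun acc paragraph =>
        paragraph.foldl (fun acc sentencedict =>
          acc ++ [pvFilterDict filterlist sentencedict]) acc) acc) []
  let totalslots : Int := mrlist.foldl (fun t mr => t + (mr.size : Int)) 0
  (totalslots, (mrlist.length : Int))

-- ===== PORT B =====
def ProdigySlotsPerMR_alt (domaindata : List (List (List (List (String × String))))) : Int × Int :=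
  let filterlist := ["text", "textidx", "paragraphidx", "lineidx"]
  -- mrs = [sd for text in domaindata for paragraph in text for sd in paragraph]
  let mrs := domaindata.flatMap (fun text => text.flatMap (fun paragraph => paragraph))
  -- allkeys = sum(len(sd) for sd in mrs)
  let allkeys : Int := (mrs.map (fun sd => (sd.length : Int))).sum
  -- filtered = sum(1 for sd in mrs for f in filterlist if f in sd)   ('f in sd' = key membership)
  let filtered : Int := (mrs.map (fun sd => ((filterlist.countP (fun f => (sd.map Prod.fst).contains f)) : Int))).sum
  (allkeys - filtered, (mrs.length : Int))

-- ===== PRECONDITION & SPEC =====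
-- Pre_ excludes sentence-dict association lists with duplicate keys: those encode no Python
-- dict input at all (a Python dict has unique keys), so A is never run on them.
def Pre_ProdigySlotsPerMR (domaindata : List (List (List (List (String × String))))) : Prop :=
  ∀ text ∈ domaindata, ∀ paragraph ∈ text, ∀ sd ∈ paragraph, (sd.map Prod.fst).Nodup
instance (domaindata : List (List (List (List (String × String))))) : Decidable (Pre_ProdigySlotsPerMR domaindata) := by unfold Pre_ProdigySlotsPerMR; infer_instance

def pvWitness_ProdigySlotsPerMR : (List (List (List (List (String × String))))) :=
  [[[[("a", "1"), ("text", "x")], []]]]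

def Spec_ProdigySlotsPerMR (domaindata : List (List (List (List (String × String))))) (out : Int × Int) : Prop := out = ProdigySlotsPerMR_alt domaindata
instance (domaindata : List (List (List (List (String × String))))) (out : Int × Int) : Decidable (Spec_ProdigySlotsPerMR domaindata out) := by unfold Spec_ProdigySlotsPerMR; infer_instance

-- ===== CLAIM (what is proved, stated in full; the proofs are below) =====
def Claim_equal_ProdigySlotsPerMR : Prop := ∀ (domaindata : List (List (List (List (String × String))))), Dom_ProdigySlotsPerMR domaindata → Pre_ProdigySlotsPerMR domaindata → Spec_ProdigySlotsPerMR domaindata (ProdigySlotsPerMR domaindata)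

-- ===== LEMMAS AND PROOFS =====

-- On a nodup key list, the filtered dict's size is the count of non-filtered keys.
theorem pvFilterDict_size_aux (fl : List String) (sd : List (String × String))
    (d : PySem.Dict String String)
    (hnd : (sd.map Prod.fst).Nodup) (hfresh : ∀ kv ∈ sd, d.contains kv.1 = false) :
    (sd.foldl (fun d kv => if fl.contains kv.1 then d else d.insert kv.1 kv.2) d).size
      = d.size + sd.countP (fun kv => !fl.contains kv.1) := by
  induction sd generalizing d with
  | nil => simp
  | cons kv tl ih =>
    simp only [List.map_cons, List.nodup_cons] at hnd
    by_cases h : fl.contains kv.1 = true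
    · simp only [List.foldl_cons, List.countP_cons, h, if_pos, Bool.not_true]
      have := ih d hnd.2 (fun p hp => hfresh p (List.mem_cons_of_mem _ hp))
      simpa using this
    · have hfa : d.contains kv.1 = false := hfresh kv (List.mem_cons_self ..)
      have hsz : (d.insert kv.1 kv.2).size = d.size + 1 := by
        rw [PySem.Dict.size_insert]; simp [hfa]
      have hfresh' : ∀ p ∈ tl, (d.insert kv.1 kv.2).contains p.1 = false := by
        intro p hp
        rw [PySem.Dict.contains_insert]
        have hne : p.1 ≠ kv.1 := by
          intro he
          exact hnd.1 (he ▸ List.mem_map_of_mem hp)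
        simp [hne, hfresh p (List.mem_cons_of_mem _ hp)]
      rw [List.foldl_cons, if_neg h, ih _ hnd.2 hfresh', hsz, List.countP_cons]
      have h' : kv.1 ∉ fl := by simpa using h
      simp [h']; omega

theorem pvFilterDict_size (fl : List String) (sd : List (String × String))
    (hnd : (sd.map Prod.fst).Nodup) :
    (pvFilterDict fl sd).size = sd.countP (fun kv => !fl.contains kv.1) := by
  unfold pvFilterDict
  rw [pvFilterDict_size_aux fl sd PySem.Dict.empty hnd (by intro kv _; simp [PySem.Dict.contains_empty])]
  simp [PySem.Dict.size_empty]

-- counting shared members is symmetric for nodup lists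
theorem countP_mem_comm (l1 l2 : List String) (h1 : l1.Nodup) (h2 : l2.Nodup) :
    l1.countP (fun x => l2.contains x) = l2.countP (fun x => l1.contains x) := by
  rw [List.countP_eq_length_filter, List.countP_eq_length_filter]
  have hperm : (l1.filter (fun x => l2.contains x)).Perm (l2.filter (fun x => l1.contains x)) := by
    rw [List.perm_ext_iff_of_nodup (h1.filter _) (h2.filter _)]
    intro a
    simp only [List.mem_filter, List.contains_iff_mem]
    constructor <;> exact fun h => ⟨h.2, by simpa using h.1⟩
  exact hperm.length_eq

-- with nodup keys: filtered size + filter-key hits = total key count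
theorem pvFilterDict_size_complement (fl : List String) (hfl : fl.Nodup)
    (sd : List (String × String)) (hnd : (sd.map Prod.fst).Nodup) :
    (pvFilterDict fl sd).size + fl.countP (fun f => (sd.map Prod.fst).contains f) = sd.length := by
  rw [pvFilterDict_size fl sd hnd, ← countP_mem_comm _ _ hnd hfl]
  have : (sd.map Prod.fst).countP (fun x => fl.contains x)
      = sd.countP (fun kv => fl.contains kv.1) := by
    rw [List.countP_map]; rfl
  rw [this]
  have := List.length_eq_countP_add_countP (fun kv => !fl.contains kv.1) (l := sd)
  have hc : sd.countP (fun a => decide ¬((!fl.contains a.1) = true)) = sd.countP (fun kv => fl.contains kv.1) := by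
    apply List.countP_congr; intro kv _; simp
  omega

-- A's inner loops only append to mrlist
theorem A_loop_eq (fl : List String) (dd : List (List (List (List (String × String)))))
    (acc : List (PySem.Dict String String)) :
    dd.foldl (fun acc text =>
      text.foldl (fun acc paragraph =>
        paragraph.foldl (fun acc sd => acc ++ [pvFilterDict fl sd]) acc) acc) acc
    = acc ++ dd.flatMap (fun text => text.flatMap (fun p => p.map (pvFilterDict fl))) := by
  induction dd generalizing acc with
  | nil => simp
  | cons t ts iht =>
    simp only [List.foldl_cons, List.flatMap_cons]
    rw [iht]
    have hmid : ∀ (text : List (List (List (String × String)))) acc,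
        text.foldl (fun acc paragraph =>
          paragraph.foldl (fun acc sd => acc ++ [pvFilterDict fl sd]) acc) acc
        = acc ++ text.flatMap (fun p => p.map (pvFilterDict fl)) := by
      intro text
      induction text with
      | nil => simp
      | cons p ps ihp =>
        intro acc
        simp only [List.foldl_cons, List.flatMap_cons]
        rw [ihp]
        have hin : ∀ (p : List (List (String × String))) acc,
            p.foldl (fun acc sd => acc ++ [pvFilterDict fl sd]) acc
              = acc ++ p.map (pvFilterDict fl) := by
          intro p
          induction p with
          | nil => simp
          | cons sd sds ihs => intro acc; simp [ihs, List.append_assoc]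
        rw [hin, List.append_assoc]
    rw [hmid, List.append_assoc]

theorem sum_sizes (l : List (PySem.Dict String String)) (t : Int) :
    l.foldl (fun t mr => t + (mr.size : Int)) t = t + (l.map (fun mr => (mr.size : Int))).sum := by
  induction l generalizing t with
  | nil => simp
  | cons x xs ih => simp [ih]; ring

theorem sum_map_sub {α : Type} (l : List α) (f g : α → Int) :
    (l.map (fun x => f x - g x)).sum = (l.map f).sum - (l.map g).sum := by
  induction l with
  | nil => simp
  | cons x xs ih => simp [ih]; ring

-- ===== VERDICT (by name: the statement is the Claim_ definition above) =====
theorem ProdigySlotsPerMR_spec : Claim_equal_ProdigySlotsPerMR := by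
  intro dd _ hpre
  unfold Spec_ProdigySlotsPerMR ProdigySlotsPerMR ProdigySlotsPerMR_alt
  simp only []
  rw [A_loop_eq, List.nil_append, sum_sizes]
  have hflat : ∀ sd ∈ dd.flatMap (fun t => t.flatMap (fun p => p)), (sd.map Prod.fst).Nodup := by
    intro sd hsd
    simp only [List.mem_flatMap] at hsd
    obtain ⟨t, ht, p, hp, hs⟩ := hsd
    exact hpre t ht p hp sd hs
  have h1 : (dd.flatMap fun text => text.flatMap fun p => p.map
        (pvFilterDict ["text", "textidx", "paragraphidx", "lineidx"]))
      = (dd.flatMap (fun t => t.flatMap (fun p => p))).map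
        (pvFilterDict ["text", "textidx", "paragraphidx", "lineidx"]) := by
    simp only [List.map_flatMap]
  rw [h1, List.map_map, List.length_map]
  have h2 : ((dd.flatMap (fun t => t.flatMap (fun p => p))).map
        ((fun mr : PySem.Dict String String => (mr.size : Int)) ∘
          pvFilterDict ["text", "textidx", "paragraphidx", "lineidx"]))
      = (dd.flatMap (fun t => t.flatMap (fun p => p))).map
        (fun sd => ((sd.length : Int) -
          ((["text", "textidx", "paragraphidx", "lineidx"].countP
            (fun f => (sd.map Prod.fst).contains f)) : Int))) := by
    apply List.map_congr_left
    intro sd hsd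
    simp only [Function.comp]
    have := pvFilterDict_size_complement ["text", "textidx", "paragraphidx", "lineidx"]
      (by decide) sd (hflat sd hsd)
    omega
  rw [h2, sum_map_sub]
  simp
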